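-- pv_equiv track=rewrite | github.com/abeziou/aoc-2025 | day-2/day-2.py | part_1_invalid_pid_sum
-- ===== SOURCE A (Python) =====
-- def part_1_invalid_pid_sum(ranges):
--     invalid_pid_sum = 0
--     for r in ranges:
--         first = r[0]
--         last = r[1]
--         for num in range(first, last + 1):
--             number_str = str(num)
--             if len(number_str) % 2 == 1:
--                 continue
--             repeats = True
--             half_length = len(number_str) // 2
--             for i in range(0, half_length):
--                 if number_str[i] != number_str[i + half_length]:
--                     repeats = False
--                     break
--             if repeats:
--                 invalid_pid_sum += num
--     return invalid_pid_sum
-- ===== SOURCE B (Python) =====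
-- def part_1_invalid_pid_sum(ranges):
--     total = 0
--     for r in ranges:
--         first = r[0]
--         last = r[1]
--         k = 1
--         while 10 ** (k - 1) * (10 ** k + 1) <= last:
--             m = 10 ** k + 1
--             lo = max(10 ** (k - 1), -(-first // m))
--             hi = min(10 ** k - 1, last // m)
--             if lo <= hi:
--                 total += m * ((lo + hi) * (hi - lo + 1) // 2)
--             k += 1
--     return total
-- ===== Notes on version B (the rewrite author's own statement) =====
-- stated objective: faster
-- what changed: Instead of scanning every integer in each range and comparing the two halves of its decimal string, B notes that the valid numbers of half-length k are exactly X*(10^k+1) for k-digit X, and sums the intersecting arithmetic series in closed form per range and half-length.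
import Mathlib
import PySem

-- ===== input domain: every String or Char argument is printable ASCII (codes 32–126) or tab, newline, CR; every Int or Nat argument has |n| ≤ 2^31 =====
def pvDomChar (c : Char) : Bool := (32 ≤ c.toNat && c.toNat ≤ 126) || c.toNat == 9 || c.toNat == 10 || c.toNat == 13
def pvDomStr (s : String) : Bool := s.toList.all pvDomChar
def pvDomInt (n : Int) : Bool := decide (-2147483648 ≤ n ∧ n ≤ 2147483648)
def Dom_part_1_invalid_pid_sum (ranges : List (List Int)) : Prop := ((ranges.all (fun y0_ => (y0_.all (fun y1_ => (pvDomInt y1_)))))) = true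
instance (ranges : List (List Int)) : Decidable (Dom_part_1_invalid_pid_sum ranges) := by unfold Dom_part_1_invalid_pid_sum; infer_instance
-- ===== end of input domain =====

-- B replaces A's per-number half-string scan by a closed-form arithmetic-series sum
-- per range and half-length (the valid numbers of half-length k are X*(10^k+1) for k-digit X).

-- ===== PORT A =====
-- inner `for i in range(0, half_length)` loop with its `break` / `repeats` flag
def repeatsFrom (s : List Char) (half : Int) (i : Int) : Bool :=
  if _h : i < half then
    if PySem.List.pyGet? s i ≠ PySem.List.pyGet? s (i + half) then false
    else repeatsFrom s half (i + 1)
  else true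
termination_by (half - i).toNat
decreasing_by omega

-- body of `for num in range(first, last + 1)` (number_str = str(num), worked on as List Char)
def aBody (acc num : Int) : Int :=
  let s := PySem.Int.toChars num
  if PySem.Int.mod ((s.length : Int)) 2 == 1 then acc
  else
    if repeatsFrom s (PySem.Int.floordiv ((s.length : Int)) 2) 0 then acc + num
    else acc

def part_1_invalid_pid_sum (ranges : List (List Int)) : Int :=
  ranges.foldl (fun acc r =>
    let first := PySem.List.pyGetD r 0 0
    let last := PySem.List.pyGetD r 1 0
    (PySem.List.pyRange first (last + 1) 1).foldl aBody acc) 0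

-- ===== PORT B =====
-- the `while 10**(k-1) * (10**k+1) <= last` loop of Source B, threading `total`
def bLoop (first last : Int) (k : Nat) (total : Int) : Int :=
  if hc : (10 : Int) ^ (k - 1) * (10 ^ k + 1) ≤ last then
    let m : Int := 10 ^ k + 1
    let lo : Int := max ((10 : Int) ^ (k - 1)) (-(PySem.Int.floordiv (-first) m))
    let hi : Int := min ((10 : Int) ^ k - 1) (PySem.Int.floordiv last m)
    let total' := if lo ≤ hi then total + m * PySem.Int.floordiv ((lo + hi) * (hi - lo + 1)) 2 else total
    bLoop first last (k + 1) total'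
  else total
termination_by (last + 2 - (10 : Int) ^ k).toNat
decreasing_by
  have h1 : (10 : Int) ^ k < 10 ^ (k + 1) :=
    pow_lt_pow_right₀ (by norm_num) (by omega)
  have h2 : (10 : Int) ^ k + 1 ≤ 10 ^ (k - 1) * (10 ^ k + 1) :=
    le_mul_of_one_le_left (by positivity) (one_le_pow₀ (by norm_num))
  have h4 : (10 : Int) ^ k + 1 ≤ last := le_trans h2 hc
  clear hc h2
  generalize (10 : Int) ^ k = a at *
  generalize (10 : Int) ^ (k + 1) = b at *
  omega

def part_1_invalid_pid_sum_alt (ranges : List (List Int)) : Int :=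
  ranges.foldl (fun total r =>
    let first := PySem.List.pyGetD r 0 0
    let last := PySem.List.pyGetD r 1 0
    bLoop first last 1 total) 0

-- ===== PRECONDITION & SPEC =====
-- Pre_ excludes exactly the inputs where A raises IndexError: a range list with fewer than 2 entries.
def Pre_part_1_invalid_pid_sum (ranges : List (List Int)) : Prop :=
  ∀ r ∈ ranges, 2 ≤ r.length
instance (ranges : List (List Int)) : Decidable (Pre_part_1_invalid_pid_sum ranges) := by
  unfold Pre_part_1_invalid_pid_sum; infer_instance

def pvWitness_part_1_invalid_pid_sum : List (List Int) := [[8, 1250], [-3, 4]]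

def Spec_part_1_invalid_pid_sum (ranges : List (List Int)) (out : Int) : Prop := out = part_1_invalid_pid_sum_alt ranges
instance (ranges : List (List Int)) (out : Int) : Decidable (Spec_part_1_invalid_pid_sum ranges out) := by unfold Spec_part_1_invalid_pid_sum; infer_instance

-- ===== CLAIM (what is proved, stated in full; the proofs are below) =====
def Claim_equal_part_1_invalid_pid_sum : Prop := ∀ (ranges : List (List Int)), Dom_part_1_invalid_pid_sum ranges → Pre_part_1_invalid_pid_sum ranges → Spec_part_1_invalid_pid_sum ranges (part_1_invalid_pid_sum ranges)

-- ===== LEMMAS AND PROOFS =====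

-- decimal digits of a, padded/truncated to width h (most significant first)
def padDigits : Nat → Nat → List Char
  | 0, _ => []
  | h + 1, a => padDigits h (a / 10) ++ [Nat.digitChar (a % 10)]

lemma padDigits_length (h a : Nat) : (padDigits h a).length = h := by
  induction h generalizing a with
  | zero => rfl
  | succ h ih => simp [padDigits, ih]

lemma digitChar_inj : ∀ x : Nat, x < 10 → ∀ y : Nat, y < 10 → Nat.digitChar x = Nat.digitChar y → x = y := by
  decide

lemma digitChar_ne_dash : ∀ x : Nat, x < 10 → Nat.digitChar x ≠ '-' := by
  decide

lemma padDigits_split (g h a b : Nat) (hb : b < 10 ^ h) :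
    padDigits (g + h) (a * 10 ^ h + b) = padDigits g a ++ padDigits h b := by
  induction h generalizing b with
  | zero =>
    have hb0 : b = 0 := by simpa using hb
    simp [hb0, padDigits]
  | succ h ih =>
    have e1 : (a * 10 ^ (h + 1) + b) / 10 = a * 10 ^ h + b / 10 := by
      have : a * 10 ^ (h + 1) + b = b + a * 10 ^ h * 10 := by ring
      rw [this, Nat.add_mul_div_right _ _ (by norm_num)]; ring
    have e2 : (a * 10 ^ (h + 1) + b) % 10 = b % 10 := by
      have : a * 10 ^ (h + 1) + b = b + a * 10 ^ h * 10 := by ring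
      rw [this, Nat.add_mul_mod_self_right]
    have hb' : b / 10 < 10 ^ h := by
      rw [Nat.div_lt_iff_lt_mul (by norm_num)]
      calc b < 10 ^ (h + 1) := hb
        _ = 10 ^ h * 10 := by ring
    have hgh : g + (h + 1) = (g + h) + 1 := by ring
    rw [hgh]
    show padDigits (g + h) ((a * 10 ^ (h + 1) + b) / 10) ++ [Nat.digitChar ((a * 10 ^ (h + 1) + b) % 10)]
        = padDigits g a ++ padDigits (h + 1) b
    rw [e1, e2, ih _ hb']
    simp [padDigits]

lemma padDigits_inj (h a b : Nat) (ha : a < 10 ^ h) (hb : b < 10 ^ h)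
    (he : padDigits h a = padDigits h b) : a = b := by
  induction h generalizing a b with
  | zero => omega
  | succ h ih =>
    simp only [padDigits] at he
    have hlen : (padDigits h (a / 10)).length = (padDigits h (b / 10)).length := by
      rw [padDigits_length, padDigits_length]
    obtain ⟨he1, he2⟩ := List.append_inj he hlen
    have hd : a % 10 = b % 10 := by
      apply digitChar_inj _ (Nat.mod_lt _ (by norm_num)) _ (Nat.mod_lt _ (by norm_num))
      simpa using he2
    have ha' : a / 10 < 10 ^ h := by
      rw [Nat.div_lt_iff_lt_mul (by norm_num)]
      calc a < 10 ^ (h + 1) := ha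
        _ = 10 ^ h * 10 := by ring
    have hb' : b / 10 < 10 ^ h := by
      rw [Nat.div_lt_iff_lt_mul (by norm_num)]
      calc b < 10 ^ (h + 1) := hb
        _ = 10 ^ h * 10 := by ring
    have := ih _ _ ha' hb' he1
    omega

lemma toDigitsCore_eq_padDigits :
    ∀ (fuel n L : Nat) (ds : List Char), n < fuel → 0 < L → 10 ^ (L - 1) ≤ n → n < 10 ^ L →
      Nat.toDigitsCore 10 fuel n ds = padDigits L n ++ ds := by
  intro fuel
  induction fuel with
  | zero => intro n L ds hfuel; omega
  | succ fuel ih =>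
    intro n L ds hfuel hL h1 h2
    by_cases hq : n / 10 = 0
    · have hn10 : n < 10 := by omega
      have hL1 : L = 1 := by
        by_contra hL1
        have : 10 ^ 1 ≤ 10 ^ (L - 1) := Nat.pow_le_pow_right (by norm_num) (by omega)
        simp at this; omega
      subst hL1
      simp only [Nat.toDigitsCore, hq, if_pos]
      simp [padDigits, hq]
    · have hn10 : 10 ≤ n := by omega
      have hL2 : 2 ≤ L := by
        by_contra hL2
        have : L = 1 := by omega
        subst this
        simp at h2; omega
      have e1 : 10 ^ (L - 1 - 1) ≤ n / 10 := by
        rw [Nat.le_div_iff_mul_le (by norm_num)]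
        calc 10 ^ (L - 1 - 1) * 10 = 10 ^ (L - 1) := by
              rw [← pow_succ]; congr 1; omega
          _ ≤ n := h1
      have e2 : n / 10 < 10 ^ (L - 1) := by
        rw [Nat.div_lt_iff_lt_mul (by norm_num)]
        calc n < 10 ^ L := h2
          _ = 10 ^ (L - 1) * 10 := by rw [← pow_succ]; congr 1; omega
      have hrec := ih (n / 10) (L - 1) (Nat.digitChar (n % 10) :: ds) (by omega) (by omega) e1 e2
      simp only [Nat.toDigitsCore, hq, if_false, eq_self_iff_true]
      norm_num
      rw [hrec]
      have : padDigits L n = padDigits (L - 1) (n / 10) ++ [Nat.digitChar (n % 10)] := by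
        have hL' : L = (L - 1) + 1 := by omega
        rw [hL']; rfl
      rw [this]
      simp

lemma toDigits_eq_padDigits (n L : Nat) (h0 : 0 < L) (h1 : 10 ^ (L - 1) ≤ n) (h2 : n < 10 ^ L) :
    Nat.toDigits 10 n = padDigits L n := by
  have := toDigitsCore_eq_padDigits (n + 1) n L [] (by omega) h0 h1 h2
  simpa [Nat.toDigits] using this

lemma toDigitsCore_no_dash :
    ∀ (fuel n : Nat) (ds : List Char), (∀ c ∈ ds, c ≠ '-') →
      ∀ c ∈ Nat.toDigitsCore 10 fuel n ds, c ≠ '-' := by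
  intro fuel
  induction fuel with
  | zero => intro n ds hds; simpa [Nat.toDigitsCore] using hds
  | succ fuel ih =>
    intro n ds hds
    have hcons : ∀ c ∈ Nat.digitChar (n % 10) :: ds, c ≠ '-' := by
      intro c hc
      rcases List.mem_cons.mp hc with h | h
      · subst h; exact digitChar_ne_dash _ (Nat.mod_lt _ (by norm_num))
      · exact hds c h
    simp only [Nat.toDigitsCore]
    split
    · exact hcons
    · exact ih _ _ hcons

lemma toDigitsCore_len_le :
    ∀ (fuel n : Nat) (ds : List Char), ds.length ≤ (Nat.toDigitsCore 10 fuel n ds).length := by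
  intro fuel
  induction fuel with
  | zero => intro n ds; simp [Nat.toDigitsCore]
  | succ fuel ih =>
    intro n ds
    simp only [Nat.toDigitsCore]
    split
    · simp
    · calc ds.length ≤ (Nat.digitChar (n % 10) :: ds).length := by simp
        _ ≤ _ := ih _ _

lemma toDigits_ne_nil (n : Nat) : Nat.toDigits 10 n ≠ [] := by
  have h : 1 ≤ (Nat.toDigits 10 n).length := by
    simp only [Nat.toDigits, Nat.toDigitsCore]
    split
    · simp
    · calc 1 = [Nat.digitChar (n % 10)].length := rfl
        _ ≤ _ := toDigitsCore_len_le _ _ _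
  intro hc; rw [hc] at h; simp at h

lemma repeatsFrom_iff (s : List Char) (half i : Int) :
    repeatsFrom s half i = true ↔
      ∀ j : Int, i ≤ j → j < half → PySem.List.pyGet? s j = PySem.List.pyGet? s (j + half) := by
  suffices H : ∀ (N : Nat) (i : Int), (half - i).toNat ≤ N →
      (repeatsFrom s half i = true ↔
        ∀ j : Int, i ≤ j → j < half → PySem.List.pyGet? s j = PySem.List.pyGet? s (j + half)) from
    H _ i le_rfl
  intro N
  induction N with
  | zero =>
    intro i hNi
    rw [repeatsFrom, dif_neg (by omega)]
    simp only [true_iff]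
    intro j h1 h2; omega
  | succ N ih =>
    intro i hNi
    by_cases hi : i < half
    · rw [repeatsFrom, dif_pos hi]
      by_cases hne : PySem.List.pyGet? s i ≠ PySem.List.pyGet? s (i + half)
      · rw [if_pos hne]
        simp only [Bool.false_eq_true, false_iff]
        push_neg
        exact ⟨i, le_rfl, hi, hne⟩
      · rw [if_neg hne]
        push_neg at hne
        rw [ih (i + 1) (by omega)]
        constructor
        · intro hall j hij hjh
          rcases eq_or_lt_of_le hij with h | h
          · subst h; exact hne
          · exact hall j (by omega) hjh
        · intro hall j hij hjh
          exact hall j (by omega) hjh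
    · rw [repeatsFrom, dif_neg hi]
      simp only [true_iff]
      intro j h1 h2; omega

lemma check_iff (h m : Nat) (hh : 0 < h) (h1 : 10 ^ (2 * h - 1) ≤ m) (h2 : m < 10 ^ (2 * h)) :
    (repeatsFrom (padDigits (2 * h) m) (h : Int) 0 = true) ↔ (10 ^ h + 1) ∣ m := by
  have hpow : (0 : Nat) < 10 ^ h := by positivity
  set X := m / 10 ^ h with hX
  set Y := m % 10 ^ h with hY
  have hXY : X * 10 ^ h + Y = m := by
    rw [hX, hY, mul_comm]; exact Nat.div_add_mod m (10 ^ h)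
  have hYlt : Y < 10 ^ h := Nat.mod_lt _ hpow
  have hXlt : X < 10 ^ h := by
    rw [hX, Nat.div_lt_iff_lt_mul hpow]
    calc m < 10 ^ (2 * h) := h2
      _ = 10 ^ h * 10 ^ h := by rw [← pow_add]; congr 1; omega
  have hsplit : padDigits (2 * h) m = padDigits h X ++ padDigits h Y := by
    rw [← hXY, show 2 * h = h + h by omega]
    exact padDigits_split h h X Y hYlt
  have hlX : (padDigits h X).length = h := padDigits_length _ _
  have hlY : (padDigits h Y).length = h := padDigits_length _ _
  have hget : ∀ j : Nat, j < h →
      (PySem.List.pyGet? (padDigits (2 * h) m) (j : Int) = (padDigits h X)[j]?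
        ∧ PySem.List.pyGet? (padDigits (2 * h) m) ((j : Int) + (h : Int)) = (padDigits h Y)[j]?) := by
    intro j hj
    constructor
    · rw [PySem.List.pyGet?_natCast, hsplit, List.getElem?_append_left (by omega)]
    · have : (j : Int) + (h : Int) = ((j + h : Nat) : Int) := by push_cast; ring
      rw [this, PySem.List.pyGet?_natCast, hsplit, List.getElem?_append_right (by omega)]
      congr 1
      omega
  rw [repeatsFrom_iff]
  constructor
  · intro hall
    have hXeqY : padDigits h X = padDigits h Y := by
      apply List.ext_getElem?
      intro j
      by_cases hj : j < h
      · have hj' := hall (j : Int) (by positivity) (by exact_mod_cast hj)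
        obtain ⟨e1, e2⟩ := hget j hj
        rw [e1, e2] at hj'
        exact hj'
      · rw [List.getElem?_eq_none (by omega), List.getElem?_eq_none (by omega)]
    have hXY' : X = Y := padDigits_inj h X Y hXlt hYlt hXeqY
    exact ⟨X, by rw [← hXY, ← hXY']; ring⟩
  · rintro ⟨c, hc⟩
    have hclt : c < 10 ^ h := by
      by_contra hge
      push_neg at hge
      have : 10 ^ h * 10 ^ h < (10 ^ h + 1) * c := by
        calc 10 ^ h * 10 ^ h ≤ 10 ^ h * c := Nat.mul_le_mul_left _ hge
          _ < (10 ^ h + 1) * c := by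
              have hc0 : 0 < c := by omega
              nlinarith
      rw [← hc] at this
      have : m < 10 ^ h * 10 ^ h := by
        calc m < 10 ^ (2 * h) := h2
          _ = 10 ^ h * 10 ^ h := by rw [← pow_add]; congr 1; omega
      omega
    have hXc : X = c := by
      rw [hX, hc, show (10 ^ h + 1) * c = 10 ^ h * c + c by ring,
        Nat.mul_add_div hpow, Nat.div_eq_of_lt hclt]
      omega
    have hYc : Y = c := by
      rw [hY, hc, show (10 ^ h + 1) * c = 10 ^ h * c + c by ring,
        Nat.mul_add_mod, Nat.mod_eq_of_lt hclt]
    have hXeqY : padDigits h X = padDigits h Y := by rw [hXc, hYc]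
    intro j hj0 hjh
    have hjh' : j.toNat < h := by omega
    have hjn : j = ((j.toNat : Nat) : Int) := by omega
    obtain ⟨e1, e2⟩ := hget j.toNat hjh'
    rw [hjn, e1, e2, hXeqY]

-- indicator summand: n itself when n is a "repeated half" number of half-length h, else 0
def g (h : Nat) (n : Int) : Int :=
  if (10 : Int) ^ (h - 1) * (10 ^ h + 1) ≤ n ∧ n ≤ ((10 : Int) ^ h - 1) * (10 ^ h + 1) ∧ ((10 : Int) ^ h + 1) ∣ n
  then n else 0

lemma aBody_split (acc num : Int) : aBody acc num = acc + aBody 0 num := by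
  simp only [aBody]; split_ifs <;> ring

lemma toChars_natCast (m L : Nat) (h0 : 0 < L) (h1 : 10 ^ (L - 1) ≤ m) (h2 : m < 10 ^ L) :
    PySem.Int.toChars (m : Int) = padDigits L m := by
  simp only [PySem.Int.toChars]
  rw [if_neg (by exact_mod_cast Int.not_lt.mpr (Int.natCast_nonneg m)), Int.toNat_natCast]
  exact toDigits_eq_padDigits m L h0 h1 h2

lemma point_even (h₀ m : Nat) (hh : 0 < h₀) (h1 : 10 ^ (2 * h₀ - 1) ≤ m) (h2 : m < 10 ^ (2 * h₀)) :
    aBody 0 (m : Int) = if ((10 : Int) ^ h₀ + 1) ∣ (m : Int) then (m : Int) else 0 := by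
  have htc := toChars_natCast m (2 * h₀) (by omega) h1 h2
  have hmod : PySem.Int.mod (((2 * h₀ : Nat) : Int)) 2 = ((2 * h₀ % 2 : Nat) : Int) := by
    exact_mod_cast PySem.Int.mod_natCast (2 * h₀) 2
  rw [Nat.mul_mod_right] at hmod
  have hdiv : PySem.Int.floordiv (((2 * h₀ : Nat) : Int)) 2 = ((h₀ : Nat) : Int) := by
    have h' := PySem.Int.floordiv_natCast (2 * h₀) 2
    rw [show 2 * h₀ / 2 = h₀ by omega] at h'
    exact_mod_cast h'
  simp only [aBody, htc, padDigits_length, hmod, hdiv]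
  rw [if_neg (by decide : ¬ ((((0 : Nat) : Int)) == 1) = true)]
  by_cases hd : (10 ^ h₀ + 1) ∣ m
  · rw [if_pos ((check_iff h₀ m hh h1 h2).mpr hd), if_pos (by exact_mod_cast hd)]
    ring
  · have hrf : repeatsFrom (padDigits (2 * h₀) m) (((h₀ : Nat)) : Int) 0 = false := by
      rw [← Bool.not_eq_true, check_iff h₀ m hh h1 h2]
      exact hd
    rw [if_neg (by simp [hrf]), if_neg (by exact_mod_cast hd)]

lemma point_odd (L m : Nat) (hodd : L % 2 = 1) (h1 : 10 ^ (L - 1) ≤ m) (h2 : m < 10 ^ L) :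
    aBody 0 (m : Int) = 0 := by
  have htc := toChars_natCast m L (by omega) h1 h2
  have hmod : PySem.Int.mod (((L : Nat) : Int)) 2 = ((L % 2 : Nat) : Int) := by
    exact_mod_cast PySem.Int.mod_natCast L 2
  rw [hodd] at hmod
  simp only [aBody, htc, padDigits_length, hmod]
  norm_num

lemma point_neg (n : Int) (hn : n < 0) : aBody 0 n = 0 := by
  have htc : PySem.Int.toChars n = '-' :: Nat.toDigits 10 n.natAbs := by
    simp only [PySem.Int.toChars, if_pos hn]
  have hnd : ∀ c ∈ Nat.toDigits 10 n.natAbs, c ≠ '-' :=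
    toDigitsCore_no_dash (n.natAbs + 1) n.natAbs [] (by simp)
  set tD := Nat.toDigits 10 n.natAbs with htD
  have hL2 : 1 ≤ tD.length := List.length_pos_iff.mpr (toDigits_ne_nil _)
  have hrf : ∀ half : Int, 0 < half → half ≤ (tD.length : Int) →
      repeatsFrom ('-' :: tD) half 0 = false := by
    intro half h1f h2f
    have hne : ¬ (repeatsFrom ('-' :: tD) half 0 = true) := by
      rw [repeatsFrom_iff]
      intro hall
      have hj := hall 0 le_rfl h1f
      rw [zero_add] at hj
      have e0 : PySem.List.pyGet? ('-' :: tD) (0 : Int) = some '-' := by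
        have := PySem.List.pyGet?_natCast ('-' :: tD) 0
        simpa using this
      obtain ⟨j, hje⟩ : ∃ j : Nat, half = (j : Int) + 1 := ⟨(half - 1).toNat, by omega⟩
      have hjlt : j < tD.length := by omega
      have ef : PySem.List.pyGet? ('-' :: tD) half = some (tD[j]'hjlt) := by
        rw [hje, show (j : Int) + 1 = ((j + 1 : Nat) : Int) by push_cast; ring,
          PySem.List.pyGet?_natCast, List.getElem?_cons_succ]
        exact List.getElem?_eq_getElem hjlt
      rw [e0, ef] at hj
      exact hnd _ (List.getElem_mem _) (Option.some.inj hj).symm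
    simpa using hne
  have hlen : (('-' :: tD).length : Int) = ((tD.length + 1 : Nat) : Int) := by simp
  simp only [aBody, htc, hlen]
  have hmod : PySem.Int.mod (((tD.length + 1 : Nat) : Int)) 2 = (((tD.length + 1) % 2 : Nat) : Int) := by
    exact_mod_cast PySem.Int.mod_natCast (tD.length + 1) 2
  by_cases hpar : (tD.length + 1) % 2 = 1
  · rw [hmod, hpar]
    norm_num
  · have hpar0 : (tD.length + 1) % 2 = 0 := by omega
    rw [hmod, hpar0, if_neg (by decide : ¬ ((((0 : Nat) : Int)) == 1) = true)]
    have hdiv : PySem.Int.floordiv (((tD.length + 1 : Nat) : Int)) 2 = (((tD.length + 1) / 2 : Nat) : Int) := by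
      exact_mod_cast PySem.Int.floordiv_natCast (tD.length + 1) 2
    rw [hdiv, hrf _ (by omega) (by omega)]
    simp

lemma g_nonpos (h : Nat) (n : Int) (hn : n ≤ 0) : g h n = 0 := by
  have hp : (0 : Int) < 10 ^ (h - 1) * (10 ^ h + 1) := by positivity
  rw [g, if_neg]
  rintro ⟨c1, -, -⟩
  linarith

lemma point (n : Int) (hn : n ≤ 2 ^ 31) :
    aBody 0 n = g 1 n + g 2 n + g 3 n + g 4 n + g 5 n := by
  rcases lt_trichotomy n 0 with hneg | hz | hpos
  · rw [point_neg n hneg, g_nonpos 1 n (by omega), g_nonpos 2 n (by omega),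
      g_nonpos 3 n (by omega), g_nonpos 4 n (by omega), g_nonpos 5 n (by omega)]
    ring
  · subst hz
    rw [show aBody 0 0 = 0 from by decide, g_nonpos 1 0 le_rfl, g_nonpos 2 0 le_rfl,
      g_nonpos 3 0 le_rfl, g_nonpos 4 0 le_rfl, g_nonpos 5 0 le_rfl]
    ring
  · obtain ⟨m, rfl⟩ : ∃ m : Nat, n = (m : Int) := ⟨n.toNat, by omega⟩
    have hm0 : 0 < m := by exact_mod_cast hpos
    have hmB : m < 10 ^ 10 := by
      have h10 : (2 : Int) ^ 31 < 10 ^ 10 := by norm_num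
      exact_mod_cast lt_of_le_of_lt hn h10
    obtain ⟨L, hL1, hL10, hb1, hb2⟩ : ∃ L, 1 ≤ L ∧ L ≤ 10 ∧ 10 ^ (L - 1) ≤ m ∧ m < 10 ^ L := by
      refine ⟨Nat.log 10 m + 1, by omega, ?_, ?_, Nat.lt_pow_succ_log_self (by norm_num) m⟩
      · have := Nat.log_lt_of_lt_pow (by omega : m ≠ 0) hmB
        omega
      · simpa using Nat.pow_log_le_self 10 (by omega : m ≠ 0)
    interval_cases L
    · rw [point_odd 1 m (by norm_num) hb1 hb2]
      norm_num at hb1 hb2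
      simp only [g]; norm_num; split_ifs <;> omega
    · rw [point_even 1 m (by norm_num) (by norm_num at hb1 ⊢; omega) (by norm_num at hb2 ⊢; omega)]
      norm_num at hb1 hb2
      simp only [g]; norm_num; split_ifs <;> omega
    · rw [point_odd 3 m (by norm_num) hb1 hb2]
      norm_num at hb1 hb2
      simp only [g]; norm_num; split_ifs <;> omega
    · rw [point_even 2 m (by norm_num) (by norm_num at hb1 ⊢; omega) (by norm_num at hb2 ⊢; omega)]
      norm_num at hb1 hb2
      simp only [g]; norm_num; split_ifs <;> omega
    · rw [point_odd 5 m (by norm_num) hb1 hb2]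
      norm_num at hb1 hb2
      simp only [g]; norm_num; split_ifs <;> omega
    · rw [point_even 3 m (by norm_num) (by norm_num at hb1 ⊢; omega) (by norm_num at hb2 ⊢; omega)]
      norm_num at hb1 hb2
      simp only [g]; norm_num; split_ifs <;> omega
    · rw [point_odd 7 m (by norm_num) hb1 hb2]
      norm_num at hb1 hb2
      simp only [g]; norm_num; split_ifs <;> omega
    · rw [point_even 4 m (by norm_num) (by norm_num at hb1 ⊢; omega) (by norm_num at hb2 ⊢; omega)]
      norm_num at hb1 hb2
      simp only [g]; norm_num; split_ifs <;> omega
    · rw [point_odd 9 m (by norm_num) hb1 hb2]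
      norm_num at hb1 hb2
      simp only [g]; norm_num; split_ifs <;> omega
    · rw [point_even 5 m (by norm_num) (by norm_num at hb1 ⊢; omega) (by norm_num at hb2 ⊢; omega)]
      norm_num at hb1 hb2
      simp only [g]; norm_num; split_ifs <;> omega

def gser (h : Nat) (f l : Int) : Int :=
  if max ((10 : Int) ^ (h - 1)) (-(PySem.Int.floordiv (-f) (10 ^ h + 1)))
      ≤ min ((10 : Int) ^ h - 1) (PySem.Int.floordiv l (10 ^ h + 1)) then
    (10 ^ h + 1) *
      PySem.Int.floordiv
        ((max ((10 : Int) ^ (h - 1)) (-(PySem.Int.floordiv (-f) (10 ^ h + 1)))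
            + min ((10 : Int) ^ h - 1) (PySem.Int.floordiv l (10 ^ h + 1)))
          * (min ((10 : Int) ^ h - 1) (PySem.Int.floordiv l (10 ^ h + 1))
            - max ((10 : Int) ^ (h - 1)) (-(PySem.Int.floordiv (-f) (10 ^ h + 1))) + 1)) 2
  else 0

lemma gauss_aux (lo : Int) :
    ∀ N : Nat, 2 * (PySem.List.pyRange lo (lo + N + 1) 1).sum = (2 * lo + N) * (N + 1) := by
  intro N
  induction N with
  | zero =>
    rw [show lo + (0 : Nat) + 1 = lo + 1 by push_cast; ring,
      PySem.List.pyRange_one_succ_right le_rfl, PySem.List.pyRange_one_eq_nil le_rfl]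
    norm_num
  | succ N ih =>
    rw [show lo + ((N + 1 : Nat) : Int) + 1 = (lo + N + 1) + 1 by push_cast; ring,
      PySem.List.pyRange_one_succ_right (by push_cast; omega)]
    rw [List.sum_append, List.sum_cons, List.sum_nil]
    push_cast
    push_cast at ih
    linear_combination ih

lemma gauss (lo hi : Int) (h : lo ≤ hi) :
    2 * (PySem.List.pyRange lo (hi + 1) 1).sum = (lo + hi) * (hi - lo + 1) := by
  have hN : hi = lo + ((hi - lo).toNat : Int) := by omega
  rw [hN]
  have := gauss_aux lo (hi - lo).toNat
  rw [this]
  have : ((hi - lo).toNat : Int) = hi - lo := by omega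
  rw [this]
  ring

lemma neg_succ_ediv (l m : Int) (hm : 0 < m) : (-(l + 1)) / m = -(l / m) - 1 := by
  have hl := Int.ediv_add_emod l m
  have hr0 : 0 ≤ l % m := Int.emod_nonneg l (ne_of_gt hm)
  have hrm : l % m < m := Int.emod_lt_of_pos l hm
  have h0 : ((m - l % m - 1) + (-(l / m) - 1) * m) / m = (m - l % m - 1) / m + (-(l / m) - 1) :=
    Int.add_mul_ediv_right _ _ (ne_of_gt hm)
  rw [show (m - l % m - 1) + (-(l / m) - 1) * m = -(l + 1) by linear_combination -hl] at h0
  rw [h0, Int.ediv_eq_zero_of_lt (by omega) (by omega)]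
  ring

lemma sub_one_ediv (l m : Int) (hm : 0 < m) :
    (l - 1) / m = if l % m = 0 then l / m - 1 else l / m := by
  have hl := Int.ediv_add_emod l m
  have hr0 : 0 ≤ l % m := Int.emod_nonneg l (ne_of_gt hm)
  have hrm : l % m < m := Int.emod_lt_of_pos l hm
  have h0 : ((l % m - 1) + (l / m) * m) / m = (l % m - 1) / m + l / m :=
    Int.add_mul_ediv_right _ _ (ne_of_gt hm)
  rw [show (l % m - 1) + (l / m) * m = l - 1 by linear_combination hl] at h0
  rw [h0]
  by_cases hr : l % m = 0
  · rw [if_pos hr, hr]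
    have hm1 : (-1 : Int) / m = -1 := by
      have h1 : ((m - 1) + (-1) * m) / m = (m - 1) / m + (-1) :=
        Int.add_mul_ediv_right _ _ (ne_of_gt hm)
      rw [show (m - 1) + (-1) * m = (-1 : Int) by ring] at h1
      rw [h1, Int.ediv_eq_zero_of_lt (by omega) (by omega)]
      ring
    rw [show (0 : Int) - 1 = -1 by ring, hm1]
    ring
  · rw [if_neg hr, Int.ediv_eq_zero_of_lt (by omega) (by omega)]
    ring

lemma sumg (m α β : Int) (hm : 0 < m) (f l : Int) :
    ((PySem.List.pyRange f (l + 1) 1).map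
      (fun n => if α * m ≤ n ∧ n ≤ β * m ∧ m ∣ n then n else 0)).sum
      = m * (PySem.List.pyRange (max α (-((-f) / m))) ((min β (l / m)) + 1) 1).sum := by
  suffices H : ∀ (N : Nat) (l : Int), (l + 1 - f).toNat = N →
      ((PySem.List.pyRange f (l + 1) 1).map
        (fun n => if α * m ≤ n ∧ n ≤ β * m ∧ m ∣ n then n else 0)).sum
        = m * (PySem.List.pyRange (max α (-((-f) / m))) ((min β (l / m)) + 1) 1).sum from
    H _ l rfl
  intro N
  induction N with
  | zero =>
    intro l hN
    have hlf : l + 1 ≤ f := by omega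
    rw [PySem.List.pyRange_one_eq_nil (by omega)]
    have e1 : (-(l + 1)) / m = -(l / m) - 1 := neg_succ_ediv l m hm
    have e2 : (-f) / m ≤ (-(l + 1)) / m := Int.ediv_le_ediv hm (by omega)
    rw [PySem.List.pyRange_one_eq_nil (by
      have h3 : -((-f) / m) ≥ l / m + 1 := by omega
      have h4 : min β (l / m) ≤ l / m := min_le_right _ _
      have h5 : max α (-((-f) / m)) ≥ -((-f) / m) := le_max_right _ _
      omega)]
    simp
  | succ N ih =>
    intro l hN
    have hfl : f ≤ l := by omega
    rw [PySem.List.pyRange_one_succ_right hfl, List.map_append, List.sum_append]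
    have ihl := ih (l - 1) (by omega)
    rw [show l - 1 + 1 = l by ring] at ihl
    have hl := Int.ediv_add_emod l m
    have hr0 : 0 ≤ l % m := Int.emod_nonneg l (ne_of_gt hm)
    have hrm : l % m < m := Int.emod_lt_of_pos l hm
    have hstep := sub_one_ediv l m hm
    by_cases hr : l % m = 0
    · rw [if_pos hr] at hstep
      rw [hstep] at ihl
      rw [ihl]
      simp only [List.map_cons, List.map_nil, List.sum_cons, List.sum_nil, add_zero]
      have hdvd : m ∣ l := ⟨l / m, by linear_combination hr - hl⟩
      have hlq : m * (l / m) = l := by linear_combination hl - hr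
      by_cases hqα : l / m < α
      · have hlt : l < α * m := by nlinarith [mul_le_mul_of_nonneg_left (show l / m ≤ α - 1 by omega) (le_of_lt hm)]
        rw [if_neg (by rintro ⟨c1, -, -⟩; linarith)]
        have hminq : min β (l / m) ≤ l / m := min_le_right _ _
        have hminq' : min β (l / m - 1) ≤ l / m - 1 := min_le_right _ _
        have hmax : α ≤ max α (-((-f) / m)) := le_max_left _ _
        rw [PySem.List.pyRange_one_eq_nil (by omega), PySem.List.pyRange_one_eq_nil (by omega)]
        simp
      · by_cases hqβ : β < l / m
        · have hgt : β * m < l := by nlinarith [mul_le_mul_of_nonneg_left (show β + 1 ≤ l / m by omega) (le_of_lt hm)]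
          rw [if_neg (by rintro ⟨-, c2, -⟩; linarith)]
          rw [show min β (l / m) = β by omega, show min β (l / m - 1) = β by omega]
          ring
        · push_neg at hqα hqβ
          have hpos : α * m ≤ l := by nlinarith [mul_le_mul_of_nonneg_left hqα (le_of_lt hm)]
          have hpos2 : l ≤ β * m := by nlinarith [mul_le_mul_of_nonneg_left hqβ (le_of_lt hm)]
          rw [if_pos ⟨hpos, hpos2, hdvd⟩]
          have hceil : -((-f) / m) ≤ l / m := by
            have h6 : (-(m * (l / m))) / m = -(l / m) := by
              rw [show -(m * (l / m)) = (-(l / m)) * m by ring, Int.mul_ediv_cancel _ (ne_of_gt hm)]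
            have h7 : (-f) / m ≥ (-(m * (l / m))) / m := Int.ediv_le_ediv hm (by omega)
            omega
          have hlo : max α (-((-f) / m)) ≤ l / m := by omega
          rw [show min β (l / m) = l / m by omega, show min β (l / m - 1) = l / m - 1 by omega,
            show l / m - 1 + 1 = l / m by ring]
          rw [PySem.List.pyRange_one_succ_right hlo, List.sum_append, List.sum_cons, List.sum_nil]
          ring_nf
          linarith [hlq]
    · rw [if_neg hr] at hstep
      rw [hstep] at ihl
      rw [ihl]
      simp only [List.map_cons, List.map_nil, List.sum_cons, List.sum_nil, add_zero]
      have hnd : ¬ m ∣ l := by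
        intro hd
        rw [Int.emod_eq_zero_of_dvd hd] at hr
        exact hr rfl
      rw [if_neg (by rintro ⟨-, -, c3⟩; exact hnd c3)]
      ring

lemma sumg_gser (h : Nat) (f l : Int) :
    ((PySem.List.pyRange f (l + 1) 1).map (g h)).sum = gser h f l := by
  have hm : (0 : Int) < 10 ^ h + 1 := by positivity
  unfold g gser
  rw [sumg ((10 : Int) ^ h + 1) ((10 : Int) ^ (h - 1)) ((10 : Int) ^ h - 1) hm f l]
  rw [PySem.Int.floordiv_eq_ediv_of_pos hm, PySem.Int.floordiv_eq_ediv_of_pos hm]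
  set lo := max ((10 : Int) ^ (h - 1)) (-((-f) / (10 ^ h + 1))) with hlo
  set hi := min ((10 : Int) ^ h - 1) (l / (10 ^ h + 1)) with hhi
  by_cases hlh : lo ≤ hi
  · rw [if_pos hlh, PySem.Int.floordiv_eq_ediv_of_pos (by norm_num)]
    have hg := gauss lo hi hlh
    rw [← hg, Int.mul_ediv_cancel_left _ (by norm_num)]
  · rw [if_neg hlh, PySem.List.pyRange_one_eq_nil (by omega)]
    simp

lemma gser_zero (h : Nat) (f l : Int) (hc : ¬ ((10 : Int) ^ (h - 1) * (10 ^ h + 1) ≤ l)) :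
    gser h f l = 0 := by
  have hm : (0 : Int) < 10 ^ h + 1 := by positivity
  simp only [gser]
  rw [if_neg]
  push_neg at hc
  have hfd : PySem.Int.floordiv l (10 ^ h + 1) < 10 ^ (h - 1) :=
    (PySem.Int.floordiv_lt_iff_lt_mul hm).mpr (by linarith)
  have h1 : min ((10 : Int) ^ h - 1) (PySem.Int.floordiv l (10 ^ h + 1)) ≤ PySem.Int.floordiv l (10 ^ h + 1) :=
    min_le_right _ _
  have h2 : (10 : Int) ^ (h - 1) ≤ max ((10 : Int) ^ (h - 1)) (-(PySem.Int.floordiv (-f) (10 ^ h + 1))) :=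
    le_max_left _ _
  omega

lemma bLoop_step (f l : Int) (k : Nat) (acc : Int)
    (hc : (10 : Int) ^ (k - 1) * (10 ^ k + 1) ≤ l) :
    bLoop f l k acc = bLoop f l (k + 1) (acc + gser k f l) := by
  rw [bLoop, dif_pos hc]
  show bLoop f l (k + 1)
      (if max ((10 : Int) ^ (k - 1)) (-(PySem.Int.floordiv (-f) (10 ^ k + 1)))
          ≤ min ((10 : Int) ^ k - 1) (PySem.Int.floordiv l (10 ^ k + 1)) then
        acc + (10 ^ k + 1) *
          PySem.Int.floordiv
            ((max ((10 : Int) ^ (k - 1)) (-(PySem.Int.floordiv (-f) (10 ^ k + 1)))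
                + min ((10 : Int) ^ k - 1) (PySem.Int.floordiv l (10 ^ k + 1)))
              * (min ((10 : Int) ^ k - 1) (PySem.Int.floordiv l (10 ^ k + 1))
                - max ((10 : Int) ^ (k - 1)) (-(PySem.Int.floordiv (-f) (10 ^ k + 1))) + 1)) 2
      else acc) = bLoop f l (k + 1) (acc + gser k f l)
  congr 1
  unfold gser
  split_ifs <;> ring

lemma bLoop_stop (f l : Int) (k : Nat) (acc : Int)
    (hc : ¬ ((10 : Int) ^ (k - 1) * (10 ^ k + 1) ≤ l)) :
    bLoop f l k acc = acc := by
  rw [bLoop, dif_neg hc]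

lemma bLoop_unroll (f l acc : Int) (hl : l ≤ 2 ^ 31) :
    bLoop f l 1 acc = acc + gser 1 f l + gser 2 f l + gser 3 f l + gser 4 f l + gser 5 f l := by
  by_cases c1 : (10 : Int) ^ (1 - 1) * (10 ^ 1 + 1) ≤ l
  · rw [bLoop_step f l 1 acc c1]
    by_cases c2 : (10 : Int) ^ (2 - 1) * (10 ^ 2 + 1) ≤ l
    · rw [bLoop_step f l 2 _ c2]
      by_cases c3 : (10 : Int) ^ (3 - 1) * (10 ^ 3 + 1) ≤ l
      · rw [bLoop_step f l 3 _ c3]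
        by_cases c4 : (10 : Int) ^ (4 - 1) * (10 ^ 4 + 1) ≤ l
        · rw [bLoop_step f l 4 _ c4]
          by_cases c5 : (10 : Int) ^ (5 - 1) * (10 ^ 5 + 1) ≤ l
          · rw [bLoop_step f l 5 _ c5]
            rw [bLoop_stop f l 6 _ (by norm_num; omega)]
          · rw [bLoop_stop f l 5 _ c5, gser_zero 5 f l c5]
            ring
        · rw [bLoop_stop f l 4 _ c4, gser_zero 4 f l c4,
            gser_zero 5 f l (by norm_num at c4 ⊢; omega)]
          ring
      · rw [bLoop_stop f l 3 _ c3, gser_zero 3 f l c3,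
          gser_zero 4 f l (by norm_num at c3 ⊢; omega),
          gser_zero 5 f l (by norm_num at c3 ⊢; omega)]
        ring
    · rw [bLoop_stop f l 2 _ c2, gser_zero 2 f l c2,
        gser_zero 3 f l (by norm_num at c2 ⊢; omega),
        gser_zero 4 f l (by norm_num at c2 ⊢; omega),
        gser_zero 5 f l (by norm_num at c2 ⊢; omega)]
      ring
  · rw [bLoop_stop f l 1 acc c1, gser_zero 1 f l c1,
      gser_zero 2 f l (by norm_num at c1 ⊢; omega),
      gser_zero 3 f l (by norm_num at c1 ⊢; omega),
      gser_zero 4 f l (by norm_num at c1 ⊢; omega),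
      gser_zero 5 f l (by norm_num at c1 ⊢; omega)]
    ring

lemma foldl_aBody (xs : List Int) (acc : Int) :
    xs.foldl aBody acc = acc + (xs.map (fun n => aBody 0 n)).sum := by
  induction xs generalizing acc with
  | nil => simp
  | cons x xs ih =>
    simp only [List.foldl_cons, List.map_cons, List.sum_cons]
    rw [ih, aBody_split]; ring

lemma range_eq (f l acc : Int) (hl : l ≤ 2 ^ 31) :
    (PySem.List.pyRange f (l + 1) 1).foldl aBody acc = bLoop f l 1 acc := by
  rw [foldl_aBody, bLoop_unroll f l acc hl]
  have hmap : (PySem.List.pyRange f (l + 1) 1).map (fun n => aBody 0 n)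
      = (PySem.List.pyRange f (l + 1) 1).map (fun n => g 1 n + (g 2 n + (g 3 n + (g 4 n + g 5 n)))) := by
    apply List.map_congr_left
    intro n hn
    rw [PySem.List.mem_pyRange_one] at hn
    have := point n (by omega)
    omega
  rw [hmap]
  rw [PySem.List.sum_map_add_int, PySem.List.sum_map_add_int, PySem.List.sum_map_add_int,
    PySem.List.sum_map_add_int]
  rw [sumg_gser, sumg_gser, sumg_gser, sumg_gser, sumg_gser]
  ring

lemma top_eq : ∀ (ranges : List (List Int)), Dom_part_1_invalid_pid_sum ranges →
    Pre_part_1_invalid_pid_sum ranges → ∀ acc : Int,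
    List.foldl (fun acc r =>
      let first := PySem.List.pyGetD r 0 0
      let last := PySem.List.pyGetD r 1 0
      (PySem.List.pyRange first (last + 1) 1).foldl aBody acc) acc ranges
    = List.foldl (fun total r =>
      let first := PySem.List.pyGetD r 0 0
      let last := PySem.List.pyGetD r 1 0
      bLoop first last 1 total) acc ranges := by
  intro ranges
  induction ranges with
  | nil => intro _ _ acc; rfl
  | cons r rs ih =>
    intro hdom hpre acc
    have hdom' : Dom_part_1_invalid_pid_sum rs := by
      unfold Dom_part_1_invalid_pid_sum at hdom ⊢
      simp only [List.all_cons, Bool.and_eq_true] at hdom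
      exact hdom.2
    have hpre' : Pre_part_1_invalid_pid_sum rs := fun r' hr' => hpre r' (List.mem_cons_of_mem _ hr')
    have hrlen : 2 ≤ r.length := hpre r (List.mem_cons_self)
    have hlast : PySem.List.pyGetD r 1 0 ≤ 2 ^ 31 := by
      rcases r with _ | ⟨a, _ | ⟨b, t⟩⟩
      · simp at hrlen
      · simp at hrlen
      · have hget : PySem.List.pyGetD (a :: b :: t) 1 0 = (a :: b :: t).getD 1 0 := by
          exact_mod_cast PySem.List.pyGetD_natCast (a :: b :: t) 1 0
        rw [hget]
        unfold Dom_part_1_invalid_pid_sum at hdom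
        simp only [List.all_cons, Bool.and_eq_true, pvDomInt, decide_eq_true_eq] at hdom
        obtain ⟨⟨-, ⟨-, hb⟩, -⟩, -⟩ := hdom
        have hgd : (a :: b :: t).getD 1 0 = b := by simp
        rw [hgd]
        norm_num
        omega
    simp only [List.foldl_cons]
    rw [range_eq _ _ acc hlast]
    exact ih hdom' hpre' _

-- ===== VERDICT (by name: the statement is the Claim_ definition above) =====
theorem part_1_invalid_pid_sum_spec : Claim_equal_part_1_invalid_pid_sum := by
  intro ranges hdom hpre
  unfold Spec_part_1_invalid_pid_sum part_1_invalid_pid_sum part_1_invalid_pid_sum_alt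
  exact top_eq ranges hdom hpre 0
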